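-- pv_equiv track=rewrite | github.com/hari-114/Chalo_Python | LogicCapsule/String_based.py | pwords
-- ===== SOURCE A (Python) =====
-- def letter_position(ch):
--     return ord(ch.upper())-ord('A')+1
--
-- def pwords(word):
--     total=0
--     n=len(word)
--     for i in range((n+1)//2):
--         if i == n-i-1:
--             total+=letter_position(word[i])
--         else:
--             total+=abs(letter_position(word[i])-letter_position(word[n-i-1]))
--     return total
-- ===== SOURCE B (Python) =====
-- def letter_position(ch):
--     return ord(ch.upper())-ord('A')+1
--
-- def pwords(word):
--     p = [letter_position(c) for c in word]
--     s = sum(abs(x - y) for x, y in zip(p, p[::-1]))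
--     total = s // 2
--     if len(word) % 2 == 1:
--         total += p[len(word) // 2]
--     return total
-- ===== Notes on version B (the rewrite author's own statement) =====
-- stated objective: alternative
-- what changed: Replaces A's index loop over the first half (with an in-loop middle test) by a whole-word zip of the letter-position list with its reversal: the symmetric sum double-counts every mirror pair, so B halves it with an exact integer division and adds the middle letter's position back for odd lengths.
import Mathlib
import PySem

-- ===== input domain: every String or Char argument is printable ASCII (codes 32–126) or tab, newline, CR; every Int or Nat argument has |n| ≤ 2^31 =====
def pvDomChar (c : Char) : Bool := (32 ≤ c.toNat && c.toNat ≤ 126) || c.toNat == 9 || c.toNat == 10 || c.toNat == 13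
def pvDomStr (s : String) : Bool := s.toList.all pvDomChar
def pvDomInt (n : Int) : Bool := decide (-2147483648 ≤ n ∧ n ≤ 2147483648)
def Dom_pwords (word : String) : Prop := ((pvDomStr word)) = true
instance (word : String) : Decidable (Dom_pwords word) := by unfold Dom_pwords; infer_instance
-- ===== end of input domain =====

-- B replaces A's index loop over the first half by a whole-word zip with the reversal,
-- halving the doubled sum and restoring the middle letter for odd lengths (alternative
-- decomposition, same asymptotic cost).

-- ===== PORT A =====
def letterPosition (ch : Char) : Int :=
  ((PySem.Chars.upperChar ch).toNat : Int) - 65 + 1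

def pwords (word : String) : Int :=
  -- total = 0; n = len(word); for i in range((n+1)//2): …
  (PySem.List.pyRange 0 (PySem.Int.floordiv ((word.toList.length : Int) + 1) 2) 1).foldl
    (fun total i =>
      if i = (word.toList.length : Int) - i - 1 then
        total + letterPosition (PySem.List.pyGetD word.toList i ' ')
      else
        total + |letterPosition (PySem.List.pyGetD word.toList i ' ') -
                  letterPosition (PySem.List.pyGetD word.toList ((word.toList.length : Int) - i - 1) ' ')|) 0

-- ===== PORT B =====
/-- `s = sum(abs(x - y) for x, y in zip(p, p[::-1]))` of B -/
def mirrorSum (p : List Int) : Int := ((p.zip p.reverse).map (fun xy => |xy.1 - xy.2|)).sum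

def pwords_alt (word : String) : Int :=
  -- p = [letter_position(c) for c in word]; total = s // 2 (+ middle letter when odd)
  if word.toList.length % 2 = 1 then
    PySem.Int.floordiv (mirrorSum (word.toList.map letterPosition)) 2 +
      PySem.List.pyGetD (word.toList.map letterPosition) ((word.toList.length / 2 : Nat) : Int) 0
  else
    PySem.Int.floordiv (mirrorSum (word.toList.map letterPosition)) 2

-- ===== PRECONDITION & SPEC =====
def Spec_pwords (word : String) (out : Int) : Prop := out = pwords_alt word
instance (word : String) (out : Int) : Decidable (Spec_pwords word out) := by unfold Spec_pwords; infer_instance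

-- ===== CLAIM (what is proved, stated in full; the proofs are below) =====
def Claim_equal_pwords : Prop := ∀ (word : String), Dom_pwords word → Spec_pwords word (pwords word)

-- ===== LEMMAS AND PROOFS =====

/-- the mirrored absolute difference at index `k` of `p` -/
def fd (p : List Int) (k : Nat) : Int := |p.getD k 0 - p.getD (p.length - 1 - k) 0|

theorem fd_symm (p : List Int) (k : Nat) (hk : k < p.length) :
    fd p (p.length - 1 - k) = fd p k := by
  unfold fd
  have : p.length - 1 - (p.length - 1 - k) = k := by omega
  rw [this, abs_sub_comm]

theorem fd_mid (p : List Int) (h : p.length % 2 = 1) : fd p (p.length / 2) = 0 := by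
  unfold fd
  have : p.length - 1 - p.length / 2 = p.length / 2 := by omega
  rw [this]
  simp

theorem sum_all_fd (p : List Int) :
    ∑ i ∈ Finset.range p.length, fd p i = 2 * ∑ i ∈ Finset.range (p.length / 2), fd p i := by
  set n := p.length with hn
  set m := n / 2 with hm
  have hsplit : ∑ i ∈ Finset.range n, fd p i
      = ∑ i ∈ Finset.range m, fd p i + ∑ j ∈ Finset.range (n - m), fd p (m + j) := by
    have hn' : n = m + (n - m) := by omega
    calc ∑ i ∈ Finset.range n, fd p i = ∑ i ∈ Finset.range (m + (n - m)), fd p i := by rw [← hn']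
      _ = _ := Finset.sum_range_add _ _ _
  have htail : ∑ j ∈ Finset.range (n - m), fd p (m + j)
      = ∑ j ∈ Finset.range (n - m), fd p (n - m - 1 - j) := by
    apply Finset.sum_congr rfl
    intro j hj
    have hj' : j < n - m := Finset.mem_range.mp hj
    have h1 : m + j = n - 1 - (n - m - 1 - j) := by omega
    rw [h1, fd_symm p _ (by omega)]
  have hrefl : ∑ j ∈ Finset.range (n - m), fd p (n - m - 1 - j)
      = ∑ j ∈ Finset.range (n - m), fd p j := Finset.sum_range_reflect _ _
  by_cases hpar : n % 2 = 1
  · have hnm : n - m = m + 1 := by omega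
    rw [hsplit, htail, hrefl, hnm, Finset.sum_range_succ]
    have : fd p m = 0 := by
      have := fd_mid p (by omega)
      simpa [← hn, ← hm] using this
    rw [this]
    ring
  · have hnm : n - m = m := by omega
    rw [hsplit, htail, hrefl, hnm]
    ring

theorem lp_getD (cs : List Char) (k : Nat) (hk : k < cs.length) :
    (cs.map letterPosition).getD k 0 = letterPosition (cs.getD k ' ') := by
  rw [List.getD_eq_getElem _ _ (by simpa using hk), List.getD_eq_getElem _ _ hk, List.getElem_map]

theorem pwords_eq (word : String) :
    pwords word = (∑ i ∈ Finset.range (word.toList.length / 2), fd (word.toList.map letterPosition) i)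
      + (if word.toList.length % 2 = 1 then (word.toList.map letterPosition).getD (word.toList.length / 2) 0 else 0) := by
  unfold pwords
  generalize word.toList = cs
  set n := cs.length with hn
  set p := cs.map letterPosition with hp
  have hpl : p.length = n := by rw [hp, List.length_map]
  have h1 : ((n : Int) + 1) = ((n + 1 : Nat) : Int) := by push_cast; ring
  rw [h1, show PySem.Int.floordiv ((n + 1 : Nat) : Int) 2 = (((n + 1) / 2 : Nat) : Int) from by
      exact_mod_cast PySem.Int.floordiv_natCast (n + 1) 2,
    PySem.List.pyRange_zero_nat, List.foldl_map]
  have hfun : (fun (total : Int) (k : Nat) =>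
      if (k : Int) = (n : Int) - (k : Int) - 1 then
        total + letterPosition (PySem.List.pyGetD cs (k : Int) ' ')
      else
        total + |letterPosition (PySem.List.pyGetD cs (k : Int) ' ') -
                  letterPosition (PySem.List.pyGetD cs ((n : Int) - (k : Int) - 1) ' ')|)
      = (fun (total : Int) (k : Nat) => total +
          (if (k : Int) = (n : Int) - (k : Int) - 1 then
            letterPosition (PySem.List.pyGetD cs (k : Int) ' ')
          else
            |letterPosition (PySem.List.pyGetD cs (k : Int) ' ') -
              letterPosition (PySem.List.pyGetD cs ((n : Int) - (k : Int) - 1) ' ')|)) := by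
    funext t k; split <;> rfl
  rw [hfun, PySem.List.foldl_add, zero_add]
  have hmap : ∀ k ∈ List.range ((n + 1) / 2),
      (if (k : Int) = (n : Int) - (k : Int) - 1 then
        letterPosition (PySem.List.pyGetD cs (k : Int) ' ')
      else
        |letterPosition (PySem.List.pyGetD cs (k : Int) ' ') -
          letterPosition (PySem.List.pyGetD cs ((n : Int) - (k : Int) - 1) ' ')|)
      = (if n % 2 = 1 ∧ k = n / 2 then p.getD k 0 else fd p k) := by
    intro k hk
    have hk' : k < (n + 1) / 2 := List.mem_range.mp hk
    have hkn : k < n := by omega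
    have hidx : (n : Int) - (k : Int) - 1 = ((n - 1 - k : Nat) : Int) := by omega
    rw [hidx, PySem.List.pyGetD_natCast, PySem.List.pyGetD_natCast]
    have hcond : ((k : Int) = ((n - 1 - k : Nat) : Int)) ↔ (n % 2 = 1 ∧ k = n / 2) := by
      constructor
      · intro h
        have h2 : 2 * k + 1 = n := by omega
        omega
      · intro ⟨h1, h2⟩
        omega
    by_cases hc : n % 2 = 1 ∧ k = n / 2
    · rw [if_pos (hcond.mpr hc), if_pos hc, lp_getD cs k hkn]
    · rw [if_neg (fun h => hc (hcond.mp h)), if_neg hc]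
      unfold fd
      rw [hpl, lp_getD cs k hkn, lp_getD cs (n - 1 - k) (by omega)]
  rw [List.map_congr_left hmap]
  by_cases hpar : n % 2 = 1
  · have hc : (n + 1) / 2 = n / 2 + 1 := by omega
    rw [hc, List.range_succ, List.map_append, List.sum_append]
    have htail : ((List.map (fun k => if n % 2 = 1 ∧ k = n / 2 then p.getD k 0 else fd p k) [n / 2]).sum)
        = p.getD (n / 2) 0 := by simp [hpar]
    rw [htail]
    have hhead : ∀ k ∈ List.range (n / 2),
        (if n % 2 = 1 ∧ k = n / 2 then p.getD k 0 else fd p k) = fd p k := by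
      intro k hk
      have := List.mem_range.mp hk
      rw [if_neg (by omega)]
    rw [List.map_congr_left hhead, if_pos hpar]
    rfl
  · have hc : (n + 1) / 2 = n / 2 := by omega
    rw [hc]
    have hhead : ∀ k ∈ List.range (n / 2),
        (if n % 2 = 1 ∧ k = n / 2 then p.getD k 0 else fd p k) = fd p k := by
      intro k hk
      exact if_neg (by simp [hpar])
    rw [List.map_congr_left hhead, if_neg hpar, add_zero]
    rfl

theorem pwords_alt_eq (word : String) :
    pwords_alt word = (∑ i ∈ Finset.range (word.toList.length / 2), fd (word.toList.map letterPosition) i)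
      + (if word.toList.length % 2 = 1 then (word.toList.map letterPosition).getD (word.toList.length / 2) 0 else 0) := by
  unfold pwords_alt mirrorSum
  generalize word.toList = cs
  set n := cs.length with hn
  set p := cs.map letterPosition with hp
  have hpl : p.length = n := by rw [hp, List.length_map]
  have hz : (p.zip p.reverse).map (fun xy => |xy.1 - xy.2|) = (List.range n).map (fd p) := by
    apply List.ext_getElem
    · simp [hpl]
    · intro k h1 h2
      have hkn : k < n := by simpa using h2
      simp only [List.getElem_map, List.getElem_zip, List.getElem_reverse, List.getElem_range]
      unfold fd
      rw [List.getD_eq_getElem _ _ (by omega), List.getD_eq_getElem _ _ (by omega)]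
  rw [hz]
  have hsum : ((List.range n).map (fd p)).sum = ∑ i ∈ Finset.range n, fd p i := rfl
  rw [hsum, show (∑ i ∈ Finset.range n, fd p i) = ∑ i ∈ Finset.range p.length, fd p i from by rw [hpl],
    sum_all_fd p, hpl]
  have hfl : PySem.Int.floordiv (2 * ∑ i ∈ Finset.range (n / 2), fd p i) 2
      = ∑ i ∈ Finset.range (n / 2), fd p i := by
    rw [PySem.Int.floordiv_eq_ediv_of_pos (by norm_num)]
    exact Int.mul_ediv_cancel_left _ (by norm_num)
  rw [hfl]
  by_cases hpar : n % 2 = 1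
  · rw [if_pos hpar, if_pos hpar, PySem.List.pyGetD_natCast]
  · rw [if_neg hpar, if_neg hpar, add_zero]

-- ===== VERDICT (by name: the statement is the Claim_ definition above) =====
theorem pwords_spec : Claim_equal_pwords := by
  intro word _
  unfold Spec_pwords
  rw [pwords_eq, pwords_alt_eq]
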